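-- pv_equiv track=rewrite | github.com/joodevapp/lottoScan-data | generate_range_stats.py | calc_cold_range
-- ===== SOURCE A (Python) =====
-- RANGES = [
--     ("1~10", 1, 10),
--     ("11~20", 11, 20),
--     ("21~30", 21, 30),
--     ("31~40", 31, 40),
--     ("41~45", 41, 45)
-- ]
--
-- def get_range(number):
--     for label, start, end in RANGES:
--         if start <= number <= end:
--             return label
--     return ""
--
-- def calc_cold_range(data):
--     """가장 오래 안 나온 구간"""
--     cold = {}
--     for label, _, _ in RANGES:
--         count = 0
--         for item in reversed(data):
--             has_range = any(get_range(n) == label for n in item['numbers'])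
--             if has_range:
--                 break
--             count += 1
--         if count > 0:
--             cold[label] = count
--     if cold:
--         return max(cold, key=cold.get), cold[max(cold, key=cold.get)]
--     return None, 0
-- ===== SOURCE B (Python) =====
-- RANGES = [
--     ("1~10", 1, 10),
--     ("11~20", 11, 20),
--     ("21~30", 21, 30),
--     ("31~40", 31, 40),
--     ("41~45", 41, 45)
-- ]
--
-- def calc_cold_range(data):
--     """가장 오래 안 나온 구간 — one pass over reversed(data) instead of five reverse scans"""
--     first_seen = {}
--     for i, item in enumerate(reversed(data)):
--         for num in item['numbers']:
--             for label, start, end in RANGES: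
--                 if start <= num <= end and label not in first_seen:
--                     first_seen[label] = i
--     n = len(data)
--     cold = {}
--     for label, _, _ in RANGES:
--         c = first_seen.get(label, n)
--         if c > 0:
--             cold[label] = c
--     if not cold:
--         return None, 0
--     best = max(cold, key=cold.get)
--     return best, cold[best]
-- ===== Notes on version B (the rewrite author's own statement) =====
-- stated objective: alternative
-- what changed: Instead of A's five independent reverse scans of the draws (one per range label, each breaking at the first hit), B makes a single pass over enumerate(reversed(data)) recording per label the index of the most recent draw containing it, then derives each cold count from that index (len(data) if never seen).
-- outside the precondition, e.g. on calc_cold_range([{}, {'numbers': [1, 11, 21, 31, 41]}]): A returns (None, 0), B raises KeyError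
import Mathlib
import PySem

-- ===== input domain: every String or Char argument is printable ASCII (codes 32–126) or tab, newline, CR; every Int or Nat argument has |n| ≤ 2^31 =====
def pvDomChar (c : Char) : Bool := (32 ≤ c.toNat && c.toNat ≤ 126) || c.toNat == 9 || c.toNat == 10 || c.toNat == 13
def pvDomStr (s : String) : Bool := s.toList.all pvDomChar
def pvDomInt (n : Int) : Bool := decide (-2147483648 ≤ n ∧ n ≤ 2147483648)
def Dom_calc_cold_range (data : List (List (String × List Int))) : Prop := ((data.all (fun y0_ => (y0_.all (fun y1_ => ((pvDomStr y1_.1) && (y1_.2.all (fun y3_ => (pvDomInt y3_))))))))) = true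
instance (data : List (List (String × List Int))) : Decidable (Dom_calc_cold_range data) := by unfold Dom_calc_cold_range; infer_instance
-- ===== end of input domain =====

-- B replaces A's five independent reverse scans of the data by ONE pass over the reversed data
-- that records, per range label, the index of the first (most recent) draw containing it (alternative decomposition).

-- ===== PORT A =====
def pvRANGES : List (String × Int × Int) :=
  [("1~10", 1, 10), ("11~20", 11, 20), ("21~30", 21, 30), ("31~40", 31, 40), ("41~45", 41, 45)]

def get_range_go : List (String × Int × Int) → Int → String
  | [], _ => ""
  | (l, s, e) :: rest, n => if s ≤ n ∧ n ≤ e then l else get_range_go rest n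

def get_range (n : Int) : String := get_range_go pvRANGES n

-- A's inner 'for item in reversed(data): … break; count += 1' loop, applied to data.reverse;
-- item['numbers'] is (Dict.mk item).get? "numbers" ('.getD []' is reached only outside Pre_, where Python raises KeyError)
def coldCountA (label : String) : List (List (String × List Int)) → Int
  | [] => 0
  | item :: rest =>
      if (((PySem.Dict.mk item).get? "numbers").getD []).any (fun n => get_range n == label)
      then 0 else 1 + coldCountA label rest

def calc_cold_range (data : List (List (String × List Int))) : Option String × Int :=
  let cold : PySem.Dict String Int :=
    pvRANGES.foldl (fun cold r =>
      let count := coldCountA r.1 data.reverse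
      if count > 0 then cold.insert r.1 count else cold) PySem.Dict.empty
  if cold.keys = [] then (none, 0)
  else
    match PySem.List.max? cold.keys (fun l => cold.getD l 0) with
    | some m => (some m, cold.getD m 0)
    | none => (none, 0)

-- ===== PORT B =====
-- one item of B's single enumerate(reversed(data)) pass: record index i for every yet-unseen label hit
def bStep (i : Int) (item : List (String × List Int)) (fs : PySem.Dict String Int) : PySem.Dict String Int :=
  (((PySem.Dict.mk item).get? "numbers").getD []).foldl (fun fs num =>
    pvRANGES.foldl (fun fs r =>
      if r.2.1 ≤ num ∧ num ≤ r.2.2 ∧ ¬ fs.contains r.1 then fs.insert r.1 i else fs) fs) fs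

def bLoop : List (List (String × List Int)) → Int → PySem.Dict String Int → PySem.Dict String Int
  | [], _, fs => fs
  | item :: rest, i, fs => bLoop rest (i + 1) (bStep i item fs)

def calc_cold_range_alt (data : List (List (String × List Int))) : Option String × Int :=
  let fs := bLoop data.reverse 0 PySem.Dict.empty
  let n : Int := data.length
  let cold : PySem.Dict String Int :=
    pvRANGES.foldl (fun cold r =>
      let c := fs.getD r.1 n
      if c > 0 then cold.insert r.1 c else cold) PySem.Dict.empty
  if cold.keys = [] then (none, 0)
  else
    match PySem.List.max? cold.keys (fun l => cold.getD l 0) with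
    | some m => (some m, cold.getD m 0)
    | none => (none, 0)

-- ===== PRECONDITION & SPEC =====
-- Pre_ excludes inputs where some draw lacks the key 'numbers': Python A raises KeyError on almost
-- all of them, and on the few where A still returns (every missing-key draw hidden behind a more
-- recent draw covering all five ranges) B's single full pass itself raises KeyError.
def Pre_calc_cold_range (data : List (List (String × List Int))) : Prop :=
  ∀ item ∈ data, ((PySem.Dict.mk item).get? "numbers").isSome
instance (data : List (List (String × List Int))) : Decidable (Pre_calc_cold_range data) := by
  unfold Pre_calc_cold_range; infer_instance

def pvWitness_calc_cold_range : (List (List (String × List Int))) :=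
  [[("numbers", [3, 17])], [("numbers", [44])]]

def Spec_calc_cold_range (data : List (List (String × List Int))) (out : Option String × Int) : Prop := out = calc_cold_range_alt data
instance (data : List (List (String × List Int))) (out : Option String × Int) : Decidable (Spec_calc_cold_range data out) := by unfold Spec_calc_cold_range; infer_instance

-- ===== CLAIM (what is proved, stated in full; the proofs are below) =====
def Claim_equal_calc_cold_range : Prop := ∀ (data : List (List (String × List Int))), Dom_calc_cold_range data → Pre_calc_cold_range data → Spec_calc_cold_range data (calc_cold_range data)

-- ===== LEMMAS AND PROOFS =====

-- index (counted from i) of the first item of xs whose 'numbers' hits [s, e]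
def firstIdx (s e : Int) : List (List (String × List Int)) → Int → Option Int
  | [], _ => none
  | item :: rest, i =>
      if (((PySem.Dict.mk item).get? "numbers").getD []).any (fun n => decide (s ≤ n) && decide (n ≤ e))
      then some i else firstIdx s e rest (i + 1)

theorem get?_ite_insert_of_ne (C : Prop) [Decidable C] (d : PySem.Dict String Int)
    (k k' : String) (v : Int) (h : k' ≠ k) :
    ((if C then d.insert k v else d).get? k') = d.get? k' := by
  split_ifs with hc
  · exact PySem.Dict.get?_insert_of_ne d v h
  · rfl

theorem fold_not_mem (i num : Int) (L : String) (rs : List (String × Int × Int))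
    (h : ∀ r ∈ rs, r.1 ≠ L) :
    ∀ fs : PySem.Dict String Int,
    (rs.foldl (fun fs r =>
      if r.2.1 ≤ num ∧ num ≤ r.2.2 ∧ ¬ fs.contains r.1 then fs.insert r.1 i else fs) fs).get? L
      = fs.get? L := by
  induction rs with
  | nil => intro fs; rfl
  | cons r rest ih =>
      intro fs
      rw [List.foldl_cons, ih (fun x hx => h x (List.mem_cons_of_mem _ hx))]
      exact get?_ite_insert_of_ne _ _ _ _ _ (Ne.symm (h r List.mem_cons_self))

theorem bstep_num_core (L : String) (s e : Int)
    (rs1 rs2 : List (String × Int × Int))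
    (hsplit : pvRANGES = rs1 ++ (L, s, e) :: rs2)
    (h1 : ∀ r ∈ rs1, r.1 ≠ L) (h2 : ∀ r ∈ rs2, r.1 ≠ L)
    (i num : Int) (fs : PySem.Dict String Int) :
    (pvRANGES.foldl (fun fs r =>
      if r.2.1 ≤ num ∧ num ≤ r.2.2 ∧ ¬ fs.contains r.1 then fs.insert r.1 i else fs) fs).get? L =
    match fs.get? L with
    | some v => some v
    | none => if s ≤ num ∧ num ≤ e then some i else none := by
  rw [hsplit, List.foldl_append, List.foldl_cons, fold_not_mem i num L rs2 h2]
  have hd : (List.foldl (fun fs r =>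
      if r.2.1 ≤ num ∧ num ≤ r.2.2 ∧ ¬ fs.contains r.1 then fs.insert r.1 i else fs) fs rs1).get? L
      = fs.get? L := fold_not_mem i num L rs1 h1 fs
  set d := List.foldl (fun fs r =>
      if r.2.1 ≤ num ∧ num ≤ r.2.2 ∧ ¬ fs.contains r.1 then fs.insert r.1 i else fs) fs rs1 with hdd
  have hc : d.contains L = (fs.get? L).isSome := by
    rw [PySem.Dict.contains_eq_isSome_get?, hd]
  simp only []
  cases hfs : fs.get? L with
  | some v =>
      have hct : d.contains L = true := by rw [hc, hfs]; rfl
      rw [if_neg (by simp [hct]), hd, hfs]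
  | none =>
      have hcf : d.contains L = false := by rw [hc, hfs]; rfl
      by_cases hr : s ≤ num ∧ num ≤ e
      · rw [if_pos ⟨hr.1, hr.2, by simp [hcf]⟩, PySem.Dict.get?_insert_self]
        simp [hr]
      · rw [if_neg (fun hcond => hr ⟨hcond.1, hcond.2.1⟩), hd, hfs]
        simp [hr]

theorem bstep_num (L : String) (s e : Int) (hL : (L, s, e) ∈ pvRANGES) (i num : Int)
    (fs : PySem.Dict String Int) :
    (pvRANGES.foldl (fun fs r =>
      if r.2.1 ≤ num ∧ num ≤ r.2.2 ∧ ¬ fs.contains r.1 then fs.insert r.1 i else fs) fs).get? L =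
    match fs.get? L with
    | some v => some v
    | none => if s ≤ num ∧ num ≤ e then some i else none := by
  simp only [pvRANGES, List.mem_cons, Prod.mk.injEq, List.not_mem_nil, or_false] at hL
  rcases hL with ⟨rfl, rfl, rfl⟩ | ⟨rfl, rfl, rfl⟩ | ⟨rfl, rfl, rfl⟩ | ⟨rfl, rfl, rfl⟩ | ⟨rfl, rfl, rfl⟩
  · exact bstep_num_core _ _ _ [] _ rfl (by decide) (by decide) i num fs
  · exact bstep_num_core _ _ _ [("1~10", 1, 10)] _ rfl (by decide) (by decide) i num fs
  · exact bstep_num_core _ _ _ [("1~10", 1, 10), ("11~20", 11, 20)] _ rfl (by decide) (by decide) i num fs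
  · exact bstep_num_core _ _ _ [("1~10", 1, 10), ("11~20", 11, 20), ("21~30", 21, 30)] _ rfl (by decide) (by decide) i num fs
  · exact bstep_num_core _ _ _ [("1~10", 1, 10), ("11~20", 11, 20), ("21~30", 21, 30), ("31~40", 31, 40)] _ rfl (by decide) (by decide) i num fs

theorem range_label_eq (L : String) (s e : Int) (hL : (L, s, e) ∈ pvRANGES) (n : Int) :
    (get_range n == L) = (decide (s ≤ n) && decide (n ≤ e)) := by
  simp only [pvRANGES, List.mem_cons, Prod.mk.injEq] at hL
  rcases hL with ⟨rfl, rfl, rfl⟩ | ⟨rfl, rfl, rfl⟩ | ⟨rfl, rfl, rfl⟩ | ⟨rfl, rfl, rfl⟩ | ⟨rfl, rfl, rfl⟩ | h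
  · simp only [get_range, get_range_go, pvRANGES]; split_ifs <;> simp_all <;> omega
  · simp only [get_range, get_range_go, pvRANGES]; split_ifs <;> simp_all <;> omega
  · simp only [get_range, get_range_go, pvRANGES]; split_ifs <;> simp_all <;> omega
  · simp only [get_range, get_range_go, pvRANGES]; split_ifs <;> simp_all <;> omega
  · simp only [get_range, get_range_go, pvRANGES]; split_ifs <;> simp_all <;> omega
  · simp at h

theorem bstep_nums (L : String) (s e : Int) (hL : (L, s, e) ∈ pvRANGES) (i : Int) :
    ∀ (nums : List Int) (fs : PySem.Dict String Int),
    (nums.foldl (fun fs num =>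
      pvRANGES.foldl (fun fs r =>
        if r.2.1 ≤ num ∧ num ≤ r.2.2 ∧ ¬ fs.contains r.1 then fs.insert r.1 i else fs) fs) fs).get? L =
    match fs.get? L with
    | some v => some v
    | none => if nums.any (fun n => decide (s ≤ n) && decide (n ≤ e)) then some i else none := by
  intro nums
  induction nums with
  | nil => intro fs; cases hfs : fs.get? L <;> simp [hfs]
  | cons num rest ih =>
      intro fs
      rw [List.foldl_cons, ih, bstep_num L s e hL i num fs]
      cases hfs : fs.get? L with
      | some v => rfl
      | none =>
          by_cases hr : s ≤ num ∧ num ≤ e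
          · simp [hr]
          · have hfalse : (decide (s ≤ num) && decide (num ≤ e)) = false := by
              simp only [Bool.and_eq_false_iff, decide_eq_false_iff_not]; tauto
            simp only [if_neg hr, List.any_cons, hfalse, Bool.false_or]

theorem bloop_get? (L : String) (s e : Int) (hL : (L, s, e) ∈ pvRANGES) :
    ∀ (xs : List (List (String × List Int))) (i : Int) (fs : PySem.Dict String Int),
    (bLoop xs i fs).get? L =
    match fs.get? L with
    | some v => some v
    | none => firstIdx s e xs i := by
  intro xs
  induction xs with
  | nil => intro i fs; cases hfs : fs.get? L <;> simp [bLoop, firstIdx, hfs]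
  | cons item rest ih =>
      intro i fs
      rw [show bLoop (item :: rest) i fs = bLoop rest (i + 1) (bStep i item fs) from rfl,
          ih (i + 1) (bStep i item fs)]
      rw [show bStep i item fs = (((PySem.Dict.mk item).get? "numbers").getD []).foldl (fun fs num =>
        pvRANGES.foldl (fun fs r =>
          if r.2.1 ≤ num ∧ num ≤ r.2.2 ∧ ¬ fs.contains r.1 then fs.insert r.1 i else fs) fs) fs from rfl]
      rw [bstep_nums L s e hL i _ fs]
      cases hfs : fs.get? L with
      | some v => rfl
      | none =>
          simp only [firstIdx]
          by_cases hh : (((PySem.Dict.mk item).get? "numbers").getD []).any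
              (fun n => decide (s ≤ n) && decide (n ≤ e)) = true
          · simp [hh]
          · simp [hh]

theorem firstIdx_coldCount (L : String) (s e : Int) (hL : (L, s, e) ∈ pvRANGES) :
    ∀ (xs : List (List (String × List Int))) (i : Int),
    (match firstIdx s e xs i with
     | some v => v
     | none => i + (xs.length : Int)) = i + coldCountA L xs := by
  intro xs
  induction xs with
  | nil => intro i; simp [firstIdx, coldCountA]
  | cons item rest ih =>
      intro i
      have hany : (((PySem.Dict.mk item).get? "numbers").getD []).any (fun n => get_range n == L)
          = (((PySem.Dict.mk item).get? "numbers").getD []).any (fun n => decide (s ≤ n) && decide (n ≤ e)) := by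
        rw [show (fun n => get_range n == L) = (fun n : Int => decide (s ≤ n) && decide (n ≤ e))
            from funext (range_label_eq L s e hL)]
      simp only [firstIdx, coldCountA, hany]
      by_cases hh : (((PySem.Dict.mk item).get? "numbers").getD []).any
          (fun n => decide (s ≤ n) && decide (n ≤ e)) = true
      · simp [hh]
      · simp only [hh, Bool.false_eq_true, if_false]
        have hih := ih (i + 1)
        cases hf : firstIdx s e rest (i + 1) with
        | some v =>
            have hih2 : v = i + 1 + coldCountA L rest := by rw [hf] at hih; exact hih
            show v = i + (1 + coldCountA L rest)
            omega
        | none =>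
            have hih2 : i + 1 + ((rest.length : Int)) = i + 1 + coldCountA L rest := by
              rw [hf] at hih; exact hih
            show i + (((item :: rest).length : Int)) = i + (1 + coldCountA L rest)
            push_cast [List.length_cons]
            omega

theorem count_eq (L : String) (s e : Int) (hL : (L, s, e) ∈ pvRANGES)
    (data : List (List (String × List Int))) :
    (bLoop data.reverse 0 PySem.Dict.empty).getD L (data.length : Int) =
    coldCountA L data.reverse := by
  rw [PySem.Dict.getD_eq_get?_getD, bloop_get? L s e hL data.reverse 0 PySem.Dict.empty]
  rw [PySem.Dict.get?_empty]
  have h := firstIdx_coldCount L s e hL data.reverse 0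
  cases hf : firstIdx s e data.reverse 0 with
  | some v => rw [hf] at h; simpa using h
  | none =>
      rw [hf] at h
      simp only [Option.getD_none]
      simp only [zero_add] at h
      rw [← h, List.length_reverse]

theorem calc_cold_range_eq_alt (data : List (List (String × List Int))) :
    calc_cold_range data = calc_cold_range_alt data := by
  unfold calc_cold_range calc_cold_range_alt
  simp only [pvRANGES, List.foldl]
  rw [count_eq "1~10" 1 10 (by decide) data, count_eq "11~20" 11 20 (by decide) data,
      count_eq "21~30" 21 30 (by decide) data, count_eq "31~40" 31 40 (by decide) data,
      count_eq "41~45" 41 45 (by decide) data]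

-- ===== VERDICT (by name: the statement is the Claim_ definition above) =====
theorem calc_cold_range_spec : Claim_equal_calc_cold_range := by
  intro data _ _
  unfold Spec_calc_cold_range
  exact calc_cold_range_eq_alt data
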